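-- pv_equiv track=rewrite | github.com/Arav-J/pythonProject | Python_Files/BigO.py | big_solution
-- ===== SOURCE A (Python) =====
-- def big_solution(n):
--     solutions = 0
--     for a in range(n+1):
--         for b in range(n+1):
--             c = n - (a+b)
--             if c >= 0:
--                 solutions += 1
--     return solutions
-- ===== SOURCE B (Python) =====
-- def big_solution(n):
--     if n < 0:
--         return 0
--     return (n + 1) * (n + 2) // 2
-- ===== Notes on version B (the rewrite author's own statement) =====
-- stated objective: faster
-- what changed: Replaced the double loop counting pairs (a,b) with a+b<=n by the closed-form triangular number (n+1)(n+2)//2 (0 for negative n).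
import Mathlib
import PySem

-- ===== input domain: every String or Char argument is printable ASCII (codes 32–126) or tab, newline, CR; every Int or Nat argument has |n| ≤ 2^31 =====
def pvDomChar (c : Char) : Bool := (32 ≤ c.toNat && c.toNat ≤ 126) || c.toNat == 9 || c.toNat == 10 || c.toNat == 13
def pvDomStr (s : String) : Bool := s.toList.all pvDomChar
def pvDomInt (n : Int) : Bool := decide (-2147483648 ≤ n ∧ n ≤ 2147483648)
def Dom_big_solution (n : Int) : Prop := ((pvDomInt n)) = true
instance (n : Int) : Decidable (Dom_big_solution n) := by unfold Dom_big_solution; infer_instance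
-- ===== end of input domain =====

-- B replaces A's O(n^2) double loop by the closed form (n+1)(n+2)//2 (0 for n < 0): asymptotically faster.


-- ===== PORT A =====
def big_solution (n : Int) : Int :=
  (PySem.List.pyRange 0 (n+1) 1).foldl
    (fun solutions a =>
      (PySem.List.pyRange 0 (n+1) 1).foldl
        (fun solutions b =>
          let c := n - (a + b)
          if c ≥ 0 then solutions + 1 else solutions)
        solutions)
    0

-- ===== PORT B =====
def big_solution_alt (n : Int) : Int :=
  if n < 0 then 0 else PySem.Int.floordiv ((n + 1) * (n + 2)) 2

-- ===== PRECONDITION & SPEC =====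
def Spec_big_solution (n : Int) (out : Int) : Prop := out = big_solution_alt n
instance (n : Int) (out : Int) : Decidable (Spec_big_solution n out) := by unfold Spec_big_solution; infer_instance

-- ===== CLAIM (what is proved, stated in full; the proofs are below) =====
def Claim_equal_big_solution : Prop := ∀ (n : Int), Dom_big_solution n → Spec_big_solution n (big_solution n)

-- ===== LEMMAS AND PROOFS =====

-- Inner loop: for a fixed a with 0 ≤ a ≤ n it counts exactly n + 1 - a values of b.
theorem pv_inner_count (n a : Int) (h0 : 0 ≤ a) (h1 : a ≤ n) :
    ((PySem.List.pyRange 0 (n+1) 1).countP (fun b => decide (0 ≤ n - (a + b))) : Int)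
      = n + 1 - a := by
  rw [PySem.List.pyRange_one_append 0 (n + 1 - a) (n + 1) (by omega) (by omega)]
  rw [List.countP_append]
  have h2 : (PySem.List.pyRange 0 (n + 1 - a) 1).countP (fun b => decide (0 ≤ n - (a + b)))
      = (PySem.List.pyRange 0 (n + 1 - a) 1).length := by
    apply List.countP_eq_length.mpr
    intro b hb
    have := (PySem.List.mem_pyRange_one).mp hb
    simp only [decide_eq_true_eq]; omega
  have h3 : (PySem.List.pyRange (n + 1 - a) (n + 1) 1).countP (fun b => decide (0 ≤ n - (a + b))) = 0 := by
    apply List.countP_eq_zero.mpr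
    intro b hb
    have := (PySem.List.mem_pyRange_one).mp hb
    simp only [decide_eq_true_eq]; omega
  rw [h2, h3, PySem.List.length_pyRange_one]
  omega

-- Triangular sum of (n + 1 - a) over a ∈ range(m), doubled to avoid division.
theorem pv_tri_sum (m : Nat) (n : Int) :
    2 * (((PySem.List.pyRange 0 (m : Int) 1).map (fun a => n + 1 - a)).sum)
      = (m : Int) * (2 * (n + 1) - (m : Int) + 1) := by
  induction m with
  | zero => simp [PySem.List.pyRange_one_eq_nil]
  | succ k ih =>
    have hsplit : PySem.List.pyRange 0 ((k : Int) + 1) 1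
        = PySem.List.pyRange 0 (k : Int) 1 ++ [(k : Int)] :=
      PySem.List.pyRange_one_succ_right (by positivity)
    push_cast
    rw [hsplit, List.map_append, List.sum_append]
    simp only [List.map_cons, List.map_nil, List.sum_cons, List.sum_nil]
    have := ih
    push_cast at this ⊢
    ring_nf
    ring_nf at this
    omega

theorem pv_big_solution_closed (n : Int) :
    big_solution n = if n < 0 then 0 else PySem.Int.floordiv ((n + 1) * (n + 2)) 2 := by
  by_cases hn : n < 0
  · simp only [big_solution, hn, if_true]
    rw [PySem.List.pyRange_one_eq_nil (by omega)]
    rfl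
  · simp only [big_solution, hn, if_false]
    -- rewrite each inner fold as a count, then the outer fold as a sum
    have hfun : ∀ (init : Int),
        (PySem.List.pyRange 0 (n+1) 1).foldl
          (fun solutions a =>
            (PySem.List.pyRange 0 (n+1) 1).foldl
              (fun solutions b =>
                let c := n - (a + b)
                if c ≥ 0 then solutions + 1 else solutions)
              solutions)
          init
        = (PySem.List.pyRange 0 (n+1) 1).foldl
            (fun solutions a => solutions + (n + 1 - a)) init := by
      intro init
      apply PySem.List.foldl_congr_mem
      intro acc a ha
      have hmem := (PySem.List.mem_pyRange_one).mp ha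
      have hcnt := pv_inner_count n a (by omega) (by omega)
      have := PySem.List.foldl_ite_add_one (fun b => 0 ≤ n - (a + b)) (PySem.List.pyRange 0 (n+1) 1) acc
      simp only [ge_iff_le, sub_nonneg] at *
      rw [this, hcnt]
    rw [hfun 0]
    rw [PySem.List.foldl_add]
    -- sum = triangular number
    have hm : ((n + 1 : Int)) = ((n + 1).toNat : Int) := by omega
    have hs := pv_tri_sum (n + 1).toNat n
    rw [← hm] at hs
    have hs3 : 2 * (((PySem.List.pyRange 0 (n+1) 1).map (fun a => n + 1 - a)).sum)
        = (n + 1) * (n + 2) := by rw [hs]; ring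
    -- same statement with the eta-reduced map function, as it appears in the goal
    have hs2 : 2 * ((List.map (HSub.hSub (n + 1)) (PySem.List.pyRange 0 (n+1) 1)).sum)
        = (n + 1) * (n + 2) := hs3
    have hfd : PySem.Int.floordiv ((n + 1) * (n + 2)) 2 = ((n + 1) * (n + 2)) / 2 :=
      PySem.Int.floordiv_eq_ediv_of_pos (by omega)
    rw [hfd]
    omega

-- ===== VERDICT (by name: the statement is the Claim_ definition above) =====
theorem big_solution_spec : Claim_equal_big_solution := by
  intro n _
  unfold Spec_big_solution big_solution_alt
  exact pv_big_solution_closed n
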